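-- pv_equiv track=rewrite | github.com/johnxpark/algorithm | brute_force/rotate_bracket.py | solution
-- ===== SOURCE A (Python) =====
-- def is_valid(s: str):
--     while s.find('[]') != -1 or s.find('{}') != -1 or s.find('()') != -1:
--         s = s.replace('[]','').replace('{}','').replace('()','')
--     if len(s) == 0:
--         return 1
--     else:
--         return 0
--
-- def solution(s):
--     answer = 0
--
--     if len(s) % 2 != 0:
--         return 0
--
--     answer += is_valid(s)
--     for _ in range(len(s) - 1):
--         s = s[1:] + s[0]
--         answer += is_valid(s)
--
--     return answer
-- ===== SOURCE B (Python) =====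
-- def solution(s):
--     n = len(s)
--     if n % 2 != 0:
--         return 0
--     if n == 0:
--         return 1
--     pairs = {')': '(', ']': '[', '}': '{'}
--     count = 0
--     for i in range(n):
--         t = s[i:] + s[:i]
--         stack = []
--         ok = True
--         for c in t:
--             if c in '([{':
--                 stack.append(c)
--             elif c in pairs and stack and stack[-1] == pairs[c]:
--                 stack.pop()
--             else:
--                 ok = False
--                 break
--         if ok and not stack:
--             count += 1
--     return count
-- ===== Notes on version B (the rewrite author's own statement) =====
-- stated objective: alternative
-- what changed: Replaces the repeated find/replace pair-elimination validity test with a single-pass stack check per rotation, and builds each rotation directly by slicing instead of mutating the string one step at a time.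
import Mathlib
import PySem

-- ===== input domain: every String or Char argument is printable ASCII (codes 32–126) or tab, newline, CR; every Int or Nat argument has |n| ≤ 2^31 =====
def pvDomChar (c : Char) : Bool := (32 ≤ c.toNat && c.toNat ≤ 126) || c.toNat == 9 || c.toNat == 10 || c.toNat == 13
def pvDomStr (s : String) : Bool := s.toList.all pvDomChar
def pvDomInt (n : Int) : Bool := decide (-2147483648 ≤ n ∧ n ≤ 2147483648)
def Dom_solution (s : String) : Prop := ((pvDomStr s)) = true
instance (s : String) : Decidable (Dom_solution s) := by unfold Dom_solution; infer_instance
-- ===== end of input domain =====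

-- B checks each rotation with a one-pass bracket stack instead of A's repeated find/replace pair elimination.


-- ===== PORT A =====

-- s.replace('[]','').replace('{}','').replace('()','')
def pvReplace3 (cs : List Char) : List Char :=
  PySem.Chars.replace (PySem.Chars.replace (PySem.Chars.replace cs ['[', ']'] []) ['{', '}'] []) ['(', ')'] []

-- The next four lemmas justify termination of is_valid's while loop (each pass strictly
-- shortens the string); they are stated here because the port cites pvReplace3_length_lt by name.
theorem pv_go_acc (old : List Char) (fuel : Nat) (l acc : List Char) :
    PySem.Chars.replace.go old [] fuel l acc = acc.reverse ++ PySem.Chars.replace.go old [] fuel l [] := by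
  induction fuel generalizing l acc with
  | zero => simp [PySem.Chars.replace.go]
  | succ f ih =>
    cases l with
    | nil => simp [PySem.Chars.replace.go]
    | cons c t =>
      simp only [PySem.Chars.replace.go]
      by_cases hp : old.isPrefixOf (c :: t)
      · simp only [hp, if_true, List.reverse_nil, List.nil_append, List.append_nil]
        exact ih _ _
      · simp only [hp, if_false, Bool.false_eq_true]
        rw [ih _ (c :: acc), ih _ [c]]
        simp

theorem pv_go_len_le (old : List Char) (fuel : Nat) :
    ∀ l : List Char, (PySem.Chars.replace.go old [] fuel l []).length ≤ l.length := by
  induction fuel with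
  | zero => intro l; simp [PySem.Chars.replace.go]
  | succ f ih =>
    intro l
    cases l with
    | nil => simp [PySem.Chars.replace.go]
    | cons c t =>
      simp only [PySem.Chars.replace.go]
      by_cases hp : old.isPrefixOf (c :: t)
      · simp only [hp, if_true, List.reverse_nil, List.nil_append]
        calc (PySem.Chars.replace.go old [] f (List.drop old.length (c :: t)) []).length
            ≤ (List.drop old.length (c :: t)).length := ih _
          _ ≤ (c :: t).length := by simp
      · simp only [hp, if_false, Bool.false_eq_true]
        rw [pv_go_acc]
        have := ih t
        simp at this ⊢
        omega

theorem pv_go_noOcc (old : List Char) (fuel : Nat) :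
    ∀ l : List Char, ¬ old <:+: l → PySem.Chars.replace.go old [] fuel l [] = l := by
  induction fuel with
  | zero => intro l _; simp [PySem.Chars.replace.go]
  | succ f ih =>
    intro l h
    cases l with
    | nil => simp [PySem.Chars.replace.go]
    | cons c t =>
      have hp : ¬ old.isPrefixOf (c :: t) := by
        intro hp
        exact h ((List.isPrefixOf_iff_prefix.mp hp).isInfix)
      simp only [PySem.Chars.replace.go, hp, if_false, Bool.false_eq_true]
      rw [pv_go_acc, ih t (fun ht => h (List.infix_cons_iff.mpr (Or.inr ht)))]
      simp

theorem pv_go_len_lt (old : List Char) (ho : old ≠ []) (fuel : Nat) :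
    ∀ l : List Char, old <:+: l → l.length ≤ fuel →
      (PySem.Chars.replace.go old [] fuel l []).length < l.length := by
  induction fuel with
  | zero =>
    intro l h hf
    have : l = [] := by cases l <;> simp_all
    subst this
    exact absurd (List.eq_nil_of_infix_nil h) ho
  | succ f ih =>
    intro l h hf
    cases l with
    | nil => exact absurd (List.eq_nil_of_infix_nil h) ho
    | cons c t =>
      simp only [PySem.Chars.replace.go]
      by_cases hp : old.isPrefixOf (c :: t)
      · simp only [hp, if_true, List.reverse_nil, List.nil_append]
        have h1 := pv_go_len_le old f (List.drop old.length (c :: t))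
        have h2 : old.length ≥ 1 := by cases old <;> simp_all
        simp only [List.length_drop] at h1
        simp only [List.length_cons] at *
        omega
      · have hpt : old <:+: t := by
          rcases List.infix_cons_iff.mp h with h' | h'
          · exact absurd (List.isPrefixOf_iff_prefix.mpr h') hp
          · exact h'
        simp only [hp, if_false, Bool.false_eq_true]
        rw [pv_go_acc]
        have := ih t hpt (by simp at hf; omega)
        simp at this ⊢
        omega

theorem pv_replace_def (l old : List Char) (ho : old ≠ []) :
    PySem.Chars.replace l old [] = PySem.Chars.replace.go old [] l.length l [] := by
  simp [PySem.Chars.replace, ho]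

theorem pv_replace_len_le (l old : List Char) (ho : old ≠ []) :
    (PySem.Chars.replace l old []).length ≤ l.length := by
  rw [pv_replace_def l old ho]; exact pv_go_len_le old l.length l

theorem pv_replace_len_lt (l old : List Char) (ho : old ≠ []) (h : old <:+: l) :
    (PySem.Chars.replace l old []).length < l.length := by
  rw [pv_replace_def l old ho]; exact pv_go_len_lt old ho l.length l h le_rfl

theorem pv_replace_noOcc (l old : List Char) (ho : old ≠ []) (h : ¬ old <:+: l) :
    PySem.Chars.replace l old [] = l := by
  rw [pv_replace_def l old ho]; exact pv_go_noOcc old l.length l h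

theorem pvReplace3_length_lt (cs : List Char)
    (h : PySem.Chars.find cs ['[', ']'] ≠ -1 ∨ PySem.Chars.find cs ['{', '}'] ≠ -1 ∨
         PySem.Chars.find cs ['(', ')'] ≠ -1) :
    (pvReplace3 cs).length < cs.length := by
  unfold pvReplace3
  by_cases h1 : ['[', ']'] <:+: cs
  · calc (PySem.Chars.replace (PySem.Chars.replace (PySem.Chars.replace cs ['[', ']'] []) ['{', '}'] []) ['(', ')'] []).length
        ≤ (PySem.Chars.replace (PySem.Chars.replace cs ['[', ']'] []) ['{', '}'] []).length :=
          pv_replace_len_le _ _ (by simp)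
      _ ≤ (PySem.Chars.replace cs ['[', ']'] []).length := pv_replace_len_le _ _ (by simp)
      _ < cs.length := pv_replace_len_lt _ _ (by simp) h1
  · rw [pv_replace_noOcc cs ['[', ']'] (by simp) h1]
    by_cases h2 : ['{', '}'] <:+: cs
    · calc (PySem.Chars.replace (PySem.Chars.replace cs ['{', '}'] []) ['(', ')'] []).length
          ≤ (PySem.Chars.replace cs ['{', '}'] []).length := pv_replace_len_le _ _ (by simp)
        _ < cs.length := pv_replace_len_lt _ _ (by simp) h2
    · rw [pv_replace_noOcc cs ['{', '}'] (by simp) h2]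
      have h3 : ['(', ')'] <:+: cs := by
        rcases h with h | h | h
        · exact absurd ((PySem.Chars.find_ne_neg_one_iff cs _).mp h) h1
        · exact absurd ((PySem.Chars.find_ne_neg_one_iff cs _).mp h) h2
        · exact (PySem.Chars.find_ne_neg_one_iff cs _).mp h
      exact pv_replace_len_lt _ _ (by simp) h3

-- port of is_valid: the while loop is well-founded recursion on the string length
def pvIsValid (cs : List Char) : Int :=
  if PySem.Chars.find cs ['[', ']'] ≠ -1 ∨ PySem.Chars.find cs ['{', '}'] ≠ -1 ∨
     PySem.Chars.find cs ['(', ')'] ≠ -1 then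
    pvIsValid (pvReplace3 cs)
  else if cs.length = 0 then 1 else 0
termination_by cs.length
decreasing_by exact pvReplace3_length_lt cs (by tauto)

def solution (s : String) : Int :=
  let cs := s.toList
  if cs.length % 2 ≠ 0 then 0
  else
    -- answer = 0; answer += is_valid(s); then len(s)-1 times: s = s[1:] + s[0]; answer += is_valid(s)
    ((List.range (cs.length - 1)).foldl
      (fun (st : List Char × Int) _ =>
        let s' := st.1.tail ++ st.1.take 1
        (s', st.2 + pvIsValid s'))
      (cs, pvIsValid cs)).2

-- ===== PORT B =====

-- one step of B's inner loop: push an opener, pop a matching closer, fail (none = broke out) otherwise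
def pvStep (st? : Option (List Char)) (c : Char) : Option (List Char) :=
  match st? with
  | none => none
  | some st =>
    if c = '(' ∨ c = '[' ∨ c = '{' then some (c :: st)
    else if c = ')' then (match st with | '(' :: r => some r | _ => none)
    else if c = ']' then (match st with | '[' :: r => some r | _ => none)
    else if c = '}' then (match st with | '{' :: r => some r | _ => none)
    else none

-- B's inner loop plus the final "ok and not stack" test
def pvCheck (cs : List Char) : Bool := cs.foldl pvStep (some []) == some []

def solution_alt (s : String) : Int :=
  let cs := s.toList
  if cs.length % 2 ≠ 0 then 0
  else if cs.length = 0 then 1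
  else ((List.range cs.length).map
        (fun i => if pvCheck (cs.drop i ++ cs.take i) then (1 : Int) else 0)).sum

-- ===== PRECONDITION & SPEC =====
def Spec_solution (s : String) (out : Int) : Prop := out = solution_alt s
instance (s : String) (out : Int) : Decidable (Spec_solution s out) := by unfold Spec_solution; infer_instance

-- ===== CLAIM (what is proved, stated in full; the proofs are below) =====
def Claim_equal_solution : Prop := ∀ (s : String), Dom_solution s → Spec_solution s (solution s)

-- ===== LEMMAS AND PROOFS =====

theorem pv_go_run (old : List Char) (ho : old ≠ [])
    (hc : ∀ st : Option (List Char), old.foldl pvStep st = st) (fuel : Nat) :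
    ∀ (l : List Char) (st : Option (List Char)), l.length ≤ fuel →
      (PySem.Chars.replace.go old [] fuel l []).foldl pvStep st = l.foldl pvStep st := by
  induction fuel with
  | zero =>
    intro l st hf
    have : l = [] := by cases l <;> simp_all
    subst this
    simp [PySem.Chars.replace.go]
  | succ f ih =>
    intro l st hf
    cases l with
    | nil => simp [PySem.Chars.replace.go]
    | cons c t =>
      simp only [PySem.Chars.replace.go]
      by_cases hp : old.isPrefixOf (c :: t)
      · simp only [hp, if_true, List.reverse_nil, List.nil_append]
        obtain ⟨r, hr⟩ := List.isPrefixOf_iff_prefix.mp hp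
        have hdrop : List.drop old.length (c :: t) = r := by rw [← hr]; exact List.drop_left
        rw [hdrop, ih r st ?_]
        · rw [← hr, List.foldl_append, hc st]
        · have := congrArg List.length hr
          simp only [List.length_append, List.length_cons] at this
          have h1 : 1 ≤ old.length := by cases old <;> simp_all
          simp only [List.length_cons] at hf
          omega
      · simp only [hp, if_false, Bool.false_eq_true]
        rw [pv_go_acc]
        simp only [List.reverse_cons, List.reverse_nil, List.nil_append, List.singleton_append,
          List.foldl_cons]
        exact ih t (pvStep st c) (by simp at hf; omega)

theorem pv_replace_run (l old : List Char) (ho : old ≠ [])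
    (hc : ∀ st : Option (List Char), old.foldl pvStep st = st) (st : Option (List Char)) :
    (PySem.Chars.replace l old []).foldl pvStep st = l.foldl pvStep st := by
  rw [pv_replace_def l old ho]; exact pv_go_run old ho hc l.length l st le_rfl

theorem pv_cancel_paren : ∀ st : Option (List Char), List.foldl pvStep st ['(', ')'] = st := by
  intro st; cases st <;> simp [pvStep]
theorem pv_cancel_square : ∀ st : Option (List Char), List.foldl pvStep st ['[', ']'] = st := by
  intro st; cases st <;> simp [pvStep]
theorem pv_cancel_brace : ∀ st : Option (List Char), List.foldl pvStep st ['{', '}'] = st := by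
  intro st; cases st <;> simp [pvStep]

theorem pv_run_replace3 (cs : List Char) (st : Option (List Char)) :
    (pvReplace3 cs).foldl pvStep st = cs.foldl pvStep st := by
  unfold pvReplace3
  rw [pv_replace_run _ _ (by simp) pv_cancel_paren,
      pv_replace_run _ _ (by simp) pv_cancel_brace,
      pv_replace_run _ _ (by simp) pv_cancel_square]

theorem pv_foldl_pvStep_none (l : List Char) : l.foldl pvStep none = none := by
  induction l with
  | nil => rfl
  | cons c t ih => simpa [pvStep] using ih

theorem pv_run_ne_empty (t : List Char)
    (h1 : ¬ ['(', ')'] <:+: t) (h2 : ¬ ['[', ']'] <:+: t) (h3 : ¬ ['{', '}'] <:+: t) :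
    ∀ st : List Char,
      (∀ c t' o st', t = c :: t' → st = o :: st' →
        ¬ ((o = '(' ∧ c = ')') ∨ (o = '[' ∧ c = ']') ∨ (o = '{' ∧ c = '}'))) →
      t.foldl pvStep (some st) = some [] → t = [] ∧ st = [] := by
  induction t with
  | nil => intro st _ h; simpa using h
  | cons c t ih =>
    intro st hsafe hrun
    exfalso
    have h1' : ¬ ['(', ')'] <:+: t := fun h => h1 (List.infix_cons_iff.mpr (Or.inr h))
    have h2' : ¬ ['[', ']'] <:+: t := fun h => h2 (List.infix_cons_iff.mpr (Or.inr h))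
    have h3' : ¬ ['{', '}'] <:+: t := fun h => h3 (List.infix_cons_iff.mpr (Or.inr h))
    by_cases hopen : c = '(' ∨ c = '[' ∨ c = '{'
    · have hstep : pvStep (some st) c = some (c :: st) := by simp [pvStep, hopen]
      rw [List.foldl_cons, hstep] at hrun
      have := ih h1' h2' h3' (c :: st) ?_ hrun
      · exact absurd this.2 (by simp)
      · rintro c' t' o st' rfl hst hm
        injection hst with ho _
        subst ho
        rcases hm with ⟨rfl, rfl⟩ | ⟨rfl, rfl⟩ | ⟨rfl, rfl⟩
        · exact h1 (List.infix_cons_iff.mpr (Or.inl ⟨t', rfl⟩))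
        · exact h2 (List.infix_cons_iff.mpr (Or.inl ⟨t', rfl⟩))
        · exact h3 (List.infix_cons_iff.mpr (Or.inl ⟨t', rfl⟩))
    · have hnone : pvStep (some st) c = none := by
        cases st with
        | nil =>
          simp only [pvStep, hopen, if_false]
          split_ifs <;> rfl
        | cons o st' =>
          have hnm := hsafe c t o st' rfl rfl
          simp only [pvStep, hopen, if_false]
          split_ifs with hc1 hc2 hc3
          · have ho : o ≠ '(' := fun h => hnm ((Or.inl ⟨h, hc1⟩))
            split
            · rename_i heq; injection heq with h' _; exact absurd h' ho
            · rfl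
          · have ho : o ≠ '[' := fun h => hnm ((Or.inr (Or.inl ⟨h, hc2⟩)))
            split
            · rename_i heq; injection heq with h' _; exact absurd h' ho
            · rfl
          · have ho : o ≠ '{' := fun h => hnm ((Or.inr (Or.inr ⟨h, hc3⟩)))
            split
            · rename_i heq; injection heq with h' _; exact absurd h' ho
            · rfl
          · rfl
      rw [List.foldl_cons, hnone, pv_foldl_pvStep_none] at hrun
      exact absurd hrun (by simp)

theorem pvIsValid_eq_check (cs : List Char) :
    pvIsValid cs = (if pvCheck cs then (1 : Int) else 0) := by
  induction cs using pvIsValid.induct with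
  | case1 cs hcond ih =>
    rw [pvIsValid, if_pos hcond, ih]
    have : pvCheck (pvReplace3 cs) = pvCheck cs := by
      unfold pvCheck
      rw [pv_run_replace3]
    rw [this]
  | case2 cs hcond hlen =>
    rw [pvIsValid, if_neg hcond, if_pos hlen]
    have : cs = [] := List.length_eq_zero_iff.mp hlen
    subst this
    simp [pvCheck]
  | case3 cs hcond hlen =>
    rw [pvIsValid, if_neg hcond, if_neg hlen]
    rw [not_or, not_or] at hcond
    obtain ⟨f1, f2, f3⟩ := hcond
    rw [not_not] at f1 f2 f3
    have h1 : ¬ ['(', ')'] <:+: cs := (PySem.Chars.find_eq_neg_one_iff cs _).mp f3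
    have h2 : ¬ ['[', ']'] <:+: cs := (PySem.Chars.find_eq_neg_one_iff cs _).mp f1
    have h3 : ¬ ['{', '}'] <:+: cs := (PySem.Chars.find_eq_neg_one_iff cs _).mp f2
    cases cs with
    | nil => exact absurd rfl hlen
    | cons c t =>
      have : ¬ ((c :: t).foldl pvStep (some []) = some []) := by
        intro hr
        have := pv_run_ne_empty (c :: t) h1 h2 h3 [] (by rintro _ _ _ _ _ ⟨⟩) hr
        exact absurd this.1 (by simp)
      rw [if_neg (by simpa [pvCheck] using this)]

-- one step of A's rotation: s = s[1:] + s[0]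
def pvRot (x : List Char) : List Char := x.tail ++ x.take 1

theorem pvRot_iterate (cs : List Char) (k : Nat) (hk : k ≤ cs.length) :
    pvRot^[k] cs = cs.drop k ++ cs.take k := by
  induction k with
  | zero => simp
  | succ k ih =>
    rw [Function.iterate_succ_apply', ih (by omega)]
    have hlt : k < cs.length := by omega
    have hd : cs.drop k = cs[k] :: cs.drop (k + 1) := List.drop_eq_getElem_cons hlt
    unfold pvRot
    rw [hd]
    simp only [List.cons_append, List.tail_cons, List.take_succ_cons]
    rw [List.take_add_one]
    simp [hlt]

theorem pv_foldA (m : Nat) (x : List Char) (a : Int) :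
    (List.range m).foldl
      (fun (st : List Char × Int) _ =>
        let s' := st.1.tail ++ st.1.take 1
        (s', st.2 + pvIsValid s'))
      (x, a)
    = (pvRot^[m] x, a + ((List.range m).map (fun j => pvIsValid (pvRot^[j + 1] x))).sum) := by
  induction m with
  | zero => simp
  | succ m ih =>
    rw [List.range_succ, List.foldl_append, ih]
    simp only [List.foldl_cons, List.foldl_nil, List.map_append, List.sum_append,
      Function.iterate_succ_apply']
    simp [pvRot, add_assoc]

-- ===== VERDICT (by name: the statement is the Claim_ definition above) =====
theorem solution_spec : Claim_equal_solution := by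
  unfold Claim_equal_solution Spec_solution
  intro s _
  unfold solution solution_alt
  generalize s.toList = cs
  by_cases hodd : cs.length % 2 ≠ 0
  · simp [hodd]
  · simp only [hodd, if_false]
    by_cases h0 : cs.length = 0
    · have : cs = [] := List.length_eq_zero_iff.mp h0
      subst this
      simp [pvIsValid_eq_check, pvCheck]
    · rw [if_neg h0]
      rw [pv_foldA]
      obtain ⟨n, hn⟩ : ∃ n, cs.length = n + 1 := ⟨cs.length - 1, by omega⟩
      have hsum : ∀ j < cs.length, pvIsValid (pvRot^[j] cs)
          = (if pvCheck (cs.drop j ++ cs.take j) then (1 : Int) else 0) := by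
        intro j hj
        rw [pvRot_iterate cs j (by omega), pvIsValid_eq_check]
      rw [hn]
      simp only [Nat.add_sub_cancel]
      rw [List.range_succ_eq_map]
      simp only [List.map_cons, List.map_map, List.sum_cons]
      have h00 : pvIsValid (pvRot^[0] cs) = pvIsValid cs := by simp
      rw [← h00, hsum 0 (by omega)]
      congr 1
      refine congrArg List.sum (List.map_congr_left ?_)
      intro j hj
      have hj' : j < n := List.mem_range.mp hj
      simp only [Function.comp_apply]
      simpa using hsum (j + 1) (by omega)
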